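-- pv_equiv track=rewrite | github.com/krzysiek951/PrettyBom | web_app/functions/part_list_validator.py | get_position_delimiter
-- ===== SOURCE A (Python) =====
-- from typing import Optional, TYPE_CHECKING
--
-- def get_position_delimiter(string: str) -> Optional[str]:
--     """" Returns unique non-digit delimiter between numbers. """
--
--     delimiter_candidates = {char for char in string if not char.isdigit()}
--
--     if len(delimiter_candidates) > 1:
--         raise ValueError("Only one number delimiter is allowed.")
--     if not delimiter_candidates:
--         return None
--     delimiter = ''.join(delimiter_candidates)
--
--     return delimiter
-- ===== SOURCE B (Python) =====
-- from typing import Optional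
--
--
-- def get_position_delimiter(string: str) -> Optional[str]:
--     """ Returns unique non-digit delimiter between numbers. """
--     delimiter = None
--     for char in string:
--         if char.isdigit():
--             continue
--         if delimiter is None:
--             delimiter = char
--         elif char != delimiter:
--             raise ValueError("Only one number delimiter is allowed.")
--     return delimiter
-- ===== Notes on version B (the rewrite author's own statement) =====
-- stated objective: alternative
-- what changed: Replaces the materialised set comprehension plus length check and join with a single pass over the string keeping one Optional[str] accumulator, raising on the first conflicting non-digit character.
import Mathlib
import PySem

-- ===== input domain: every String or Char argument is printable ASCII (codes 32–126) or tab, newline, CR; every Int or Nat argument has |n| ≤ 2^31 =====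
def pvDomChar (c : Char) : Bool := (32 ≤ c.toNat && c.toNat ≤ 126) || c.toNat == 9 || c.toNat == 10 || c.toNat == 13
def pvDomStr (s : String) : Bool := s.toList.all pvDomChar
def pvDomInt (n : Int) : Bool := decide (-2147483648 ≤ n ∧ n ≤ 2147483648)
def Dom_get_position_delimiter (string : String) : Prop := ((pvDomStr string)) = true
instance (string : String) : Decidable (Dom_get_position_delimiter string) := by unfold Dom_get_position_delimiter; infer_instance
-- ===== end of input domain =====

-- B replaces A's set comprehension + length check with a single pass over the string
-- keeping one Optional accumulator; same values, same ValueError on conflict.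

-- ===== PORT A =====
def get_position_delimiter (string : String) : Option String :=
  -- delimiter_candidates = {char for char in string if not char.isdigit()}
  let delimiter_candidates : PySem.Set Char :=
    PySem.Set.ofList (string.toList.filter (fun c => !(PySem.Chars.isdigit c)))
  if PySem.Set.len delimiter_candidates > 1 then
    none  -- raise ValueError("Only one number delimiter is allowed.")  — excluded by Pre_
  else if delimiter_candidates = [] then
    none
  else
    -- ''.join over a set with exactly one element (order irrelevant on a singleton)
    some (String.ofList delimiter_candidates)

-- ===== PORT B =====
def pvAltLoop (cs : List Char) (delimiter : Option Char) : Option Char :=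
  match cs with
  | [] => delimiter
  | c :: rest =>
    if PySem.Chars.isdigit c then pvAltLoop rest delimiter
    else
      match delimiter with
      | none => pvAltLoop rest (some c)
      | some d =>
        if c ≠ d then
          none  -- raise ValueError("Only one number delimiter is allowed.")  — excluded by Pre_
        else
          pvAltLoop rest delimiter

def get_position_delimiter_alt (string : String) : Option String :=
  (pvAltLoop string.toList none).map (fun c => String.ofList [c])

-- ===== PRECONDITION & SPEC =====
-- Pre_ excludes exactly the inputs on which the Python A raises ValueError (two or more
-- distinct non-digit characters); B raises the same ValueError there.
def Pre_get_position_delimiter (string : String) : Prop :=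
  (PySem.List.dedup (string.toList.filter (fun c => !(PySem.Chars.isdigit c)))).length ≤ 1
instance (string : String) : Decidable (Pre_get_position_delimiter string) := by
  unfold Pre_get_position_delimiter; infer_instance

def pvWitness_get_position_delimiter : String := "12,34"

def Spec_get_position_delimiter (string : String) (out : Option String) : Prop := out = get_position_delimiter_alt string
instance (string : String) (out : Option String) : Decidable (Spec_get_position_delimiter string out) := by unfold Spec_get_position_delimiter; infer_instance

-- ===== CLAIM (what is proved, stated in full; the proofs are below) =====
def Claim_equal_get_position_delimiter : Prop := ∀ (string : String), Dom_get_position_delimiter string → Pre_get_position_delimiter string → Spec_get_position_delimiter string (get_position_delimiter string)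

-- ===== LEMMAS AND PROOFS =====

-- Once B's accumulator holds the unique delimiter, it never changes.
theorem pvAltLoop_some (l : List Char) (x : Char)
    (h : ∀ a ∈ l, ¬ PySem.Chars.isdigit a = true → a = x) :
    pvAltLoop l (some x) = some x := by
  induction l with
  | nil => rfl
  | cons c rest ih =>
    simp only [pvAltLoop]
    by_cases hd : PySem.Chars.isdigit c = true
    · simp only [hd, if_true]
      exact ih (fun a ha hna => h a (List.mem_cons_of_mem _ ha) hna)
    · have hc : c = x := h c (List.mem_cons_self) hd
      simp only [hc, ne_eq, not_true_eq_false, if_false, ite_self]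
      exact ih (fun a ha hna => h a (List.mem_cons_of_mem _ ha) hna)

-- B's loop returns the first non-digit character (if any) when all non-digit characters agree.
theorem pvAltLoop_none (l : List Char)
    (h : ∀ a ∈ l, ∀ b ∈ l, ¬ PySem.Chars.isdigit a = true → ¬ PySem.Chars.isdigit b = true → a = b) :
    pvAltLoop l none = (l.filter (fun c => !(PySem.Chars.isdigit c))).head? := by
  induction l with
  | nil => rfl
  | cons c rest ih =>
    simp only [pvAltLoop, List.filter_cons]
    by_cases hd : PySem.Chars.isdigit c = true
    · simp only [hd, if_true, Bool.not_true, Bool.false_eq_true, if_false]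
      exact ih (fun a ha b hb => h a (List.mem_cons_of_mem _ ha) b (List.mem_cons_of_mem _ hb))
    · simp only [hd, Bool.not_false, if_true, List.head?_cons]
      exact pvAltLoop_some rest c
        (fun a ha hna => h a (List.mem_cons_of_mem _ ha) c List.mem_cons_self hna hd)

-- set(f) when every element of f equals c: adding copies of c to [c] does nothing.
theorem pvFoldlAdd_const (f : List Char) (c : Char) (h : ∀ a ∈ f, a = c) :
    f.foldl PySem.Set.add [c] = [c] := by
  induction f with
  | nil => rfl
  | cons a rest ih =>
    have ha : a = c := h a List.mem_cons_self
    simp only [List.foldl_cons, ha]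
    have : PySem.Set.add [c] c = [c] := by
      simp [PySem.Set.add, PySem.Set.contains]
    rw [this]
    exact ih (fun a ha => h a (List.mem_cons_of_mem _ ha))

theorem pvSetOfList_const (f : List Char) (c : Char) (h : ∀ a ∈ f, a = c) :
    PySem.Set.ofList (c :: f) = [c] := by
  have : PySem.Set.ofList (c :: f) = f.foldl PySem.Set.add (PySem.Set.add [] c) := by
    rw [PySem.Set.ofList_eq_foldl]; rfl
  rw [this]
  have hadd : PySem.Set.add ([] : List Char) c = [c] := rfl
  rw [hadd]
  exact pvFoldlAdd_const f c h

-- ===== VERDICT (by name: the statement is the Claim_ definition above) =====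
theorem get_position_delimiter_spec : Claim_equal_get_position_delimiter := by
  intro s _ hpre0
  have hpre : ∀ a ∈ s.toList, ∀ b ∈ s.toList,
      ¬ PySem.Chars.isdigit a = true → ¬ PySem.Chars.isdigit b = true → a = b := by
    intro a ha b hb hna hnb
    have ha' : a ∈ PySem.List.dedup (s.toList.filter (fun c => !(PySem.Chars.isdigit c))) := by
      rw [PySem.List.mem_dedup]
      exact List.mem_filter.mpr ⟨ha, by simpa using hna⟩
    have hb' : b ∈ PySem.List.dedup (s.toList.filter (fun c => !(PySem.Chars.isdigit c))) := by
      rw [PySem.List.mem_dedup]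
      exact List.mem_filter.mpr ⟨hb, by simpa using hnb⟩
    unfold Pre_get_position_delimiter at hpre0
    match hd : PySem.List.dedup (s.toList.filter (fun c => !(PySem.Chars.isdigit c))), hpre0 with
    | [], _ => rw [hd] at ha'; cases ha'
    | [x], _ =>
      rw [hd] at ha' hb'
      rw [List.mem_singleton.mp ha', List.mem_singleton.mp hb']
    | _ :: _ :: _, h2 => simp at h2
  unfold Spec_get_position_delimiter get_position_delimiter get_position_delimiter_alt
  rw [pvAltLoop_none s.toList hpre]
  set f := s.toList.filter (fun c => !(PySem.Chars.isdigit c)) with hf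
  have hmemf : ∀ a ∈ f, ¬ PySem.Chars.isdigit a = true := by
    intro a ha
    have := (List.mem_filter.mp (hf ▸ ha)).2
    simpa using this
  have hmemf' : ∀ a ∈ f, a ∈ s.toList := fun a ha => (List.mem_filter.mp (hf ▸ ha)).1
  cases hfc : f with
  | nil =>
    simp [PySem.Set.ofList, PySem.Set.len]
  | cons c rest =>
    have hall : ∀ a ∈ rest, a = c := by
      intro a ha
      have hac : a ∈ f := hfc ▸ List.mem_cons_of_mem _ ha
      have hcc : c ∈ f := hfc ▸ List.mem_cons_self
      exact hpre a (hmemf' a hac) c (hmemf' c hcc) (hmemf a hac) (hmemf c hcc)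
    have hset : PySem.Set.ofList (c :: rest) = [c] := pvSetOfList_const rest c hall
    simp [hset, PySem.Set.len]
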